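-- pv_equiv track=rewrite | github.com/LaDoodleInTheHat/Password-Cracker | gui_cracker.py | detect_charset
-- ===== SOURCE A (Python) =====
-- import string
--
-- def detect_charset(password):
--     charset = ''
--     if any(c.islower() for c in password):
--         charset += string.ascii_lowercase
--     if any(c.isupper() for c in password):
--         charset += string.ascii_uppercase
--     if any(c.isdigit() for c in password):
--         charset += string.digits
--     if any(c in string.punctuation for c in password):
--         charset += string.punctuation
--     return charset
-- ===== SOURCE B (Python) =====
-- import string
--
-- def detect_charset(password):
--     # One stateful pass over the password instead of four independent scans.
--     has_lower = has_upper = has_digit = has_punct = False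
--     for c in password:
--         if c.islower():
--             has_lower = True
--         elif c.isupper():
--             has_upper = True
--         elif c.isdigit():
--             has_digit = True
--         elif c in string.punctuation:
--             has_punct = True
--     return ((string.ascii_lowercase if has_lower else '')
--             + (string.ascii_uppercase if has_upper else '')
--             + (string.digits if has_digit else '')
--             + (string.punctuation if has_punct else ''))
-- ===== Notes on version B (the rewrite author's own statement) =====
-- stated objective: faster
-- what changed: B replaces A's four independent any(...) generator scans of the password by one stateful pass maintaining four boolean class flags (mutually exclusive branches), then concatenates the class strings for the set flags in A's fixed order.
import Mathlib
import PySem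

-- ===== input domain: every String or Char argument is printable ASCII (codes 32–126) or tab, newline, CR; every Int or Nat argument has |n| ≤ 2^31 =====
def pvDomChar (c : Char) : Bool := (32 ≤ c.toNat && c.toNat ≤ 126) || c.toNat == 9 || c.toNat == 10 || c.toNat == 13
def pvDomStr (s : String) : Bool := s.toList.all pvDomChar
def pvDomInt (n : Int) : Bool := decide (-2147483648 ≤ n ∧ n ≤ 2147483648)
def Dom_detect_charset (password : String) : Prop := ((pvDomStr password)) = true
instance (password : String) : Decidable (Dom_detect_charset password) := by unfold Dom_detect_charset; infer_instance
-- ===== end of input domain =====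

-- B replaces A's four independent any(...) scans by one stateful pass over the password
-- setting four class flags, then concatenates the class strings in the same fixed order (alternative decomposition).


-- string.ascii_lowercase / ascii_uppercase / digits / punctuation as literals
def pvLower : String := "abcdefghijklmnopqrstuvwxyz"
def pvUpper : String := "ABCDEFGHIJKLMNOPQRSTUVWXYZ"
def pvDigits : String := "0123456789"
def pvPunct : String := "!\"#$%&'()*+,-./:;<=>?@[\\]^_`{|}~"

-- ===== PORT A =====
-- `c in string.punctuation` for a single character c equals character membership in the punctuation string (exact).
def detect_charset (password : String) : String :=
  let charset := ""
  let charset := if password.toList.any (fun c => PySem.Chars.islower c) then charset ++ pvLower else charset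
  let charset := if password.toList.any (fun c => PySem.Chars.isupper c) then charset ++ pvUpper else charset
  let charset := if password.toList.any (fun c => PySem.Chars.isdigit c) then charset ++ pvDigits else charset
  let charset := if password.toList.any (fun c => pvPunct.toList.contains c) then charset ++ pvPunct else charset
  charset

-- ===== PORT B =====
-- the single pass: four flags, mutually exclusive branches, one traversal of the characters
def pvFlags : List Char → Bool → Bool → Bool → Bool → Bool × Bool × Bool × Bool
  | [], l, u, d, p => (l, u, d, p)
  | c :: cs, l, u, d, p =>
    if PySem.Chars.islower c then pvFlags cs true u d p
    else if PySem.Chars.isupper c then pvFlags cs l true d p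
    else if PySem.Chars.isdigit c then pvFlags cs l u true p
    else if pvPunct.toList.contains c then pvFlags cs l u d true
    else pvFlags cs l u d p

def detect_charset_alt (password : String) : String :=
  let r := pvFlags password.toList false false false false
  (if r.1 then pvLower else "") ++ (if r.2.1 then pvUpper else "")
    ++ (if r.2.2.1 then pvDigits else "") ++ (if r.2.2.2 then pvPunct else "")

-- ===== PRECONDITION & SPEC =====
def Spec_detect_charset (password : String) (out : String) : Prop := out = detect_charset_alt password
instance (password : String) (out : String) : Decidable (Spec_detect_charset password out) := by unfold Spec_detect_charset; infer_instance

-- ===== CLAIM (what is proved, stated in full; the proofs are below) =====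
def Claim_equal_detect_charset : Prop := ∀ (password : String), Dom_detect_charset password → Spec_detect_charset password (detect_charset password)

-- ===== LEMMAS AND PROOFS =====

-- character-class disjointness on all of Char (the PySem class tests are interval checks)
theorem pv_lower_not_upper (c : Char) (h : PySem.Chars.islower c = true) :
    PySem.Chars.isupper c = false := by
  have e1 : 'A'.val.toNat = 65 := rfl
  have e2 : 'Z'.val.toNat = 90 := rfl
  have e3 : 'a'.val.toNat = 97 := rfl
  have e4 : 'z'.val.toNat = 122 := rfl
  simp only [PySem.Chars.islower, PySem.Chars.isupper, Bool.and_eq_true, decide_eq_true_eq,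
    Char.le_def, UInt32.le_iff_toNat_le, Bool.and_eq_false_iff, decide_eq_false_iff_not,
    e1, e2, e3, e4] at *
  omega

theorem pv_lower_not_digit (c : Char) (h : PySem.Chars.islower c = true) :
    PySem.Chars.isdigit c = false := by
  have e1 : '0'.val.toNat = 48 := rfl
  have e2 : '9'.val.toNat = 57 := rfl
  have e3 : 'a'.val.toNat = 97 := rfl
  have e4 : 'z'.val.toNat = 122 := rfl
  simp only [PySem.Chars.islower, PySem.Chars.isdigit, Bool.and_eq_true, decide_eq_true_eq,
    Char.le_def, UInt32.le_iff_toNat_le, Bool.and_eq_false_iff, decide_eq_false_iff_not,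
    e1, e2, e3, e4] at *
  omega

theorem pv_upper_not_digit (c : Char) (h : PySem.Chars.isupper c = true) :
    PySem.Chars.isdigit c = false := by
  have e1 : '0'.val.toNat = 48 := rfl
  have e2 : '9'.val.toNat = 57 := rfl
  have e3 : 'A'.val.toNat = 65 := rfl
  have e4 : 'Z'.val.toNat = 90 := rfl
  simp only [PySem.Chars.isupper, PySem.Chars.isdigit, Bool.and_eq_true, decide_eq_true_eq,
    Char.le_def, UInt32.le_iff_toNat_le, Bool.and_eq_false_iff, decide_eq_false_iff_not,
    e1, e2, e3, e4] at *
  omega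

theorem pv_punct_class (c : Char) (h : c ∈ pvPunct.toList) :
    PySem.Chars.islower c = false ∧ PySem.Chars.isupper c = false ∧
      PySem.Chars.isdigit c = false := by
  simp [pvPunct] at h
  rcases h with h | h | h | h | h | h | h | h | h | h | h | h | h | h | h | h |
    h | h | h | h | h | h | h | h | h | h | h | h | h | h | h | h <;> subst h <;> decide

-- the loop invariant: pvFlags accumulates exactly the four any-scans of A
theorem pvFlags_eq (cs : List Char) (l u d p : Bool) :
    pvFlags cs l u d p =
      (l || cs.any (fun c => PySem.Chars.islower c),
       u || cs.any (fun c => PySem.Chars.isupper c),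
       d || cs.any (fun c => PySem.Chars.isdigit c),
       p || cs.any (fun c => pvPunct.toList.contains c)) := by
  induction cs generalizing l u d p with
  | nil => simp [pvFlags]
  | cons c cs ih =>
    simp only [pvFlags, List.any_cons]
    by_cases hmem : c ∈ pvPunct.toList
    · obtain ⟨hl, hu, hd⟩ := pv_punct_class c hmem
      rw [if_neg (by simp [hl]), if_neg (by simp [hu]), if_neg (by simp [hd]),
        if_pos (by simpa using hmem), ih]
      simp [hl, hu, hd, hmem]
    · by_cases hl : PySem.Chars.islower c = true
      · rw [if_pos hl, ih]
        simp [hl, pv_lower_not_upper c hl, pv_lower_not_digit c hl, hmem]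
      · rw [if_neg hl]
        by_cases hu : PySem.Chars.isupper c = true
        · rw [if_pos hu, ih]
          simp [hl, hu, pv_upper_not_digit c hu, hmem]
        · rw [if_neg hu]
          by_cases hd : PySem.Chars.isdigit c = true
          · rw [if_pos hd, ih]
            simp [hl, hu, hd, hmem]
          · rw [if_neg hd, if_neg (by simpa using hmem), ih]
            simp [hl, hu, hd, hmem]

-- ===== VERDICT (by name: the statement is the Claim_ definition above) =====
theorem detect_charset_spec : Claim_equal_detect_charset := by
  intro password _
  unfold Spec_detect_charset detect_charset detect_charset_alt
  rw [pvFlags_eq]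
  simp only [Bool.false_or]
  cases h1 : password.toList.any (fun c => PySem.Chars.islower c) <;>
  cases h2 : password.toList.any (fun c => PySem.Chars.isupper c) <;>
  cases h3 : password.toList.any (fun c => PySem.Chars.isdigit c) <;>
  cases h4 : password.toList.any (fun c => pvPunct.toList.contains c) <;>
    simp only [h1, h2, h3, h4, if_true, if_false, Bool.false_eq_true, Bool.true_eq_false,
      ite_true, ite_false] <;>
    simp [String.append_assoc]
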